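-- pv_equiv track=rewrite | github.com/jueunx0x/BOJ | 프로그래머스/1/42862. 체육복/체육복.py | solution
-- ===== SOURCE A (Python) =====
-- def solution(n, lost, reserve):
--     lost_set = set(lost)
--     reserve_set = set(reserve)
--
--     # 1) 교집합 제거
--     both = lost_set & reserve_set #교집합
--     lost_set -= both #교집합 제거
--     reserve_set -= both # 교집합 제거
--
--     # 2) 그리디: 작은 번호부터 처리
--     for i in sorted(lost_set):
--         if i - 1 in reserve_set:
--             reserve_set.remove(i - 1)
--             lost_set.remove(i)
--         elif i + 1 in reserve_set:
--             reserve_set.remove(i + 1)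
--             lost_set.remove(i)
--         else:
--             pass
--
--     return n - len(lost_set)
-- ===== SOURCE B (Python) =====
-- def solution(n, lost, reserve):
--     lost_only = sorted(set(lost) - set(reserve))
--     reserve_only = sorted(set(reserve) - set(lost))
--     unmatched = 0
--     j = 0
--     for i in lost_only:
--         while j < len(reserve_only) and reserve_only[j] < i - 1:
--             j += 1
--         if j < len(reserve_only) and reserve_only[j] in (i - 1, i + 1):
--             j += 1
--         else:
--             unmatched += 1
--     return n - unmatched
-- ===== Notes on version B (the rewrite author's own statement) =====
-- stated objective: alternative
-- what changed: Replaces the mutable-set greedy (membership test and removal of i-1/i+1 in a shrinking reserve set, counting survivors of the lost set) by a two-pointer sweep over the two sorted deduplicated difference lists, advancing a single index into the sorted spare list and counting unmatched lost students directly.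
import Mathlib
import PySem

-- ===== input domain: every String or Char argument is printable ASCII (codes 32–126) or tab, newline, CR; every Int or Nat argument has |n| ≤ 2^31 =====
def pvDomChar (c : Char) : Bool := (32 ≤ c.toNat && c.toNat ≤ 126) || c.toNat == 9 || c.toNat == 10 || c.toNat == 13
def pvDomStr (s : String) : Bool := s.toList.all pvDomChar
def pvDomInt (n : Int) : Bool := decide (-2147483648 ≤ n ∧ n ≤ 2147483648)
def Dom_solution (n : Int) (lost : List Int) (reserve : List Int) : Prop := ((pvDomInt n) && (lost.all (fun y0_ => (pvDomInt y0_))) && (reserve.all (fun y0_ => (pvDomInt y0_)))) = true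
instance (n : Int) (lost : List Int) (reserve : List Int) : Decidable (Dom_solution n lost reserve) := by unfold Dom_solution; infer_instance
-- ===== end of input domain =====

-- B replaces A's mutable-set greedy by a two-pointer sweep over the two sorted difference lists (alternative structure, same cost).

-- ===== PORT A =====
def solution (n : Int) (lost : List Int) (reserve : List Int) : Int :=
  let lostSet0 : PySem.Set Int := PySem.Set.ofList lost
  let reserveSet0 : PySem.Set Int := PySem.Set.ofList reserve
  let both : PySem.Set Int := PySem.Set.inter lostSet0 reserveSet0
  let lostSet : PySem.Set Int := PySem.Set.diff lostSet0 both
  let reserveSet : PySem.Set Int := PySem.Set.diff reserveSet0 both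
  let final :=
    (PySem.List.sorted lostSet (fun x => x) false).foldl
      (fun (st : PySem.Set Int × PySem.Set Int) i =>
        if PySem.Set.contains st.2 (i - 1) then
          -- reserve_set.remove(i-1) and lost_set.remove(i): both elements are present here, so remove = discard
          (PySem.Set.discard st.1 i, PySem.Set.discard st.2 (i - 1))
        else if PySem.Set.contains st.2 (i + 1) then
          (PySem.Set.discard st.1 i, PySem.Set.discard st.2 (i + 1))
        else st)
      (lostSet, reserveSet)
  n - PySem.Set.len final.1

-- ===== PORT B =====
-- the 'while j < len(reserve_only) and reserve_only[j] < i - 1: j += 1' loop of Source B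
def solAltSkip (R : List Int) (i : Int) (j : Nat) : Nat :=
  if h : j < R.length then
    if R[j] < i - 1 then solAltSkip R i (j + 1) else j
  else j
termination_by R.length - j

def solution_alt (n : Int) (lost : List Int) (reserve : List Int) : Int :=
  let lostOnly := PySem.List.sorted
    (PySem.Set.diff (PySem.Set.ofList lost) (PySem.Set.ofList reserve)) (fun x => x) false
  let reserveOnly := PySem.List.sorted
    (PySem.Set.diff (PySem.Set.ofList reserve) (PySem.Set.ofList lost)) (fun x => x) false
  let st := lostOnly.foldl
    (fun (st : Int × Nat) i =>
      let j := solAltSkip reserveOnly i st.2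
      if _h : j < reserveOnly.length then
        if reserveOnly[j] = i - 1 ∨ reserveOnly[j] = i + 1 then (st.1, j + 1)
        else (st.1 + 1, j)
      else (st.1 + 1, j))
    ((0 : Int), (0 : Nat))
  n - st.1

-- ===== PRECONDITION & SPEC =====
def Spec_solution (n : Int) (lost : List Int) (reserve : List Int) (out : Int) : Prop := out = solution_alt n lost reserve
instance (n : Int) (lost : List Int) (reserve : List Int) (out : Int) : Decidable (Spec_solution n lost reserve out) := by unfold Spec_solution; infer_instance

-- ===== CLAIM (what is proved, stated in full; the proofs are below) =====
def Claim_equal_solution : Prop := ∀ (n : Int) (lost : List Int) (reserve : List Int), Dom_solution n lost reserve → Spec_solution n lost reserve (solution n lost reserve)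

-- ===== LEMMAS AND PROOFS =====

theorem skip_ge (R : List Int) (i : Int) (j : Nat) : j ≤ solAltSkip R i j := by
  fun_induction solAltSkip with
  | case1 j h hlt ih => omega
  | case2 j h hlt => omega
  | case3 j h => omega

theorem skip_le (R : List Int) (i : Int) (j : Nat) (hj : j ≤ R.length) : solAltSkip R i j ≤ R.length := by
  fun_induction solAltSkip with
  | case1 j h hlt ih => exact ih (by omega)
  | case2 j h hlt => omega
  | case3 j h => omega

theorem skip_mid (R : List Int) (i : Int) (j : Nat) :
    ∀ k (h : k < R.length), j ≤ k → k < solAltSkip R i j → R[k] < i - 1 := by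
  fun_induction solAltSkip with
  | case1 j h hlt ih =>
    intro k hk hjk hks
    rcases Nat.eq_or_lt_of_le hjk with rfl | h2
    · exact hlt
    · exact ih k hk h2 hks
  | case2 j h hlt => intro k hk hjk hks; omega
  | case3 j h => intro k hk hjk hks; omega

theorem skip_head (R : List Int) (i : Int) (j : Nat) (h : solAltSkip R i j < R.length) :
    i - 1 ≤ R[solAltSkip R i j] := by
  fun_induction solAltSkip with
  | case1 j hh hlt ih => exact ih h
  | case2 j hh hlt => omega
  | case3 j hh => omega

theorem mem_drop_iff_idx (l : List Int) (x : Int) (j : Nat) :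
    x ∈ l.drop j ↔ ∃ k, ∃ h : k < l.length, j ≤ k ∧ l[k] = x := by
  rw [List.mem_iff_getElem]
  constructor
  · rintro ⟨m, hm, he⟩
    rw [List.getElem_drop] at he
    exact ⟨j + m, by simp [List.length_drop] at hm; omega, by omega, he⟩
  · rintro ⟨k, hk, hjk, he⟩
    refine ⟨k - j, ?_, ?_⟩
    · simp [List.length_drop]; omega
    · rw [List.getElem_drop]
      simp only [show j + (k - j) = k by omega]
      exact he

theorem discard_len (l : List Int) (a : Int) (h : l.Nodup) (ha : a ∈ l) :
    (PySem.Set.discard l a).length = l.length - 1 := by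
  have hc : l.count a = 1 := List.count_eq_one_of_mem h ha
  have key : ∀ (t : List Int), (t.filter (fun y => !(y == a))).length = t.length - t.count a := by
    intro t
    induction t with
    | nil => simp
    | cons x t ih =>
      by_cases hx : x = a
      · subst hx
        have : t.count x ≤ t.length := List.count_le_length
        simp [ih]
      · have : t.count a ≤ t.length := List.count_le_length
        simp [hx, ih]
        omega
  show (l.filter (fun y => !(y == a))).length = l.length - 1
  rw [key, hc]

-- the loop invariant: A's fold over (lost set, reserve set) and B's fold over (unmatched count, pointer) stay in step
theorem main_invariant
    (R : List Int) (L : List Int) (ls rs : PySem.Set Int) (c : Int) (j : Nat)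
    (hRlt : R.Pairwise (· < ·))
    (hLlt : L.Pairwise (· < ·))
    (hlsN : ls.Nodup)
    (hLls : ∀ i ∈ L, i ∈ ls)
    (hLR : ∀ i ∈ L, i ∉ R)
    (hj : j ≤ R.length)
    (inv1 : ∀ x ∈ R.drop j, x ∈ rs)
    (inv2 : ∀ x ∈ rs, x ∈ R)
    (inv3 : ∀ x ∈ rs, x ∉ R.drop j → ∀ i ∈ L, x < i - 1) :
    ((L.foldl
      (fun (st : PySem.Set Int × PySem.Set Int) i =>
        if PySem.Set.contains st.2 (i - 1) then
          (PySem.Set.discard st.1 i, PySem.Set.discard st.2 (i - 1))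
        else if PySem.Set.contains st.2 (i + 1) then
          (PySem.Set.discard st.1 i, PySem.Set.discard st.2 (i + 1))
        else st)
      (ls, rs)).1.length : Int)
    = (ls.length : Int) - L.length
      + ((L.foldl
          (fun (st : Int × Nat) i =>
            let j := solAltSkip R i st.2
            if _h : j < R.length then
              if R[j] = i - 1 ∨ R[j] = i + 1 then (st.1, j + 1)
              else (st.1 + 1, j)
            else (st.1 + 1, j))
          (c, j)).1 - c) := by
  induction L generalizing ls rs c j with
  | nil => simp
  | cons i T IH =>
    have hpg := List.pairwise_iff_getElem.mp hRlt
    obtain ⟨hiT, hTlt⟩ := List.pairwise_cons.mp hLlt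
    have hjj' : j ≤ solAltSkip R i j := skip_ge R i j
    have hj' : solAltSkip R i j ≤ R.length := skip_le R i j hj
    have hdropsub : R.drop (solAltSkip R i j) ⊆ R.drop j := List.drop_subset_drop_left R hjj'
    have inv3' : ∀ x ∈ rs, x ∉ R.drop (solAltSkip R i j) → ∀ i' ∈ (i :: T), x < i' - 1 := by
      intro x hx hnd i' hi'
      by_cases hdj : x ∈ R.drop j
      · obtain ⟨k, hk, hjk, he⟩ := (mem_drop_iff_idx R x j).mp hdj
        have hkj' : k < solAltSkip R i j := by
          by_contra hge
          exact hnd ((mem_drop_iff_idx R x (solAltSkip R i j)).mpr ⟨k, hk, by omega, he⟩)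
        have hxlt : x < i - 1 := he ▸ skip_mid R i j k hk hjk hkj'
        have hii' : i ≤ i' := by
          rcases List.mem_cons.mp hi' with rfl | hmem
          · exact le_refl _
          · exact le_of_lt (hiT i' hmem)
        omega
      · exact inv3 x hx hdj i' hi'
    have at_ptr : ∀ v, v ∈ rs → i - 1 ≤ v → (v = i - 1 ∨ (i - 1 ∉ rs ∧ v = i + 1)) →
        ∃ h : solAltSkip R i j < R.length, R[solAltSkip R i j] = v := by
      intro v hv hge hcases
      have hvdrop : v ∈ R.drop (solAltSkip R i j) := by
        by_contra hnd
        have := inv3' v hv hnd i (List.mem_cons_self)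
        omega
      obtain ⟨k, hk, hj'k, he⟩ := (mem_drop_iff_idx R v (solAltSkip R i j)).mp hvdrop
      rcases Nat.eq_or_lt_of_le hj'k with rfl | hlt
      · exact ⟨hk, he⟩
      · exfalso
        have hlen : solAltSkip R i j < R.length := lt_trans hlt hk
        have hjh : i - 1 ≤ R[solAltSkip R i j] := skip_head R i j hlen
        have hRj'rs : R[solAltSkip R i j] ∈ rs :=
          inv1 _ (hdropsub ((mem_drop_iff_idx R _ (solAltSkip R i j)).mpr
            ⟨solAltSkip R i j, hlen, le_refl _, rfl⟩))
        have hmono : R[solAltSkip R i j] < R[k] := hpg _ _ hlen hk hlt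
        rcases hcases with rfl | ⟨hno, rfl⟩
        · omega
        · have hne1 : R[solAltSkip R i j] ≠ i - 1 := fun hh => hno (hh ▸ hRj'rs)
          have hne2 : R[solAltSkip R i j] ≠ i := by
            intro hh
            exact hLR i (List.mem_cons_self) (hh ▸ List.getElem_mem hlen)
          omega
    have hils : i ∈ ls := hLls i (List.mem_cons_self)
    have hls1 : 1 ≤ ls.length := List.length_pos_of_mem hils
    by_cases h1 : (i - 1) ∈ rs
    · -- matched with the left neighbour
      obtain ⟨hlen, hval⟩ := at_ptr (i - 1) h1 (le_refl _) (Or.inl rfl)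
      rw [show ((i :: T).foldl
          (fun (st : PySem.Set Int × PySem.Set Int) i =>
            if PySem.Set.contains st.2 (i - 1) then
              (PySem.Set.discard st.1 i, PySem.Set.discard st.2 (i - 1))
            else if PySem.Set.contains st.2 (i + 1) then
              (PySem.Set.discard st.1 i, PySem.Set.discard st.2 (i + 1))
            else st)
          (ls, rs))
          = T.foldl _ (PySem.Set.discard ls i, PySem.Set.discard rs (i - 1)) from by
        rw [List.foldl_cons]; congr 1; simp [h1]]
      rw [show ((i :: T).foldl
          (fun (st : Int × Nat) i =>
            let j := solAltSkip R i st.2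
            if _h : j < R.length then
              if R[j] = i - 1 ∨ R[j] = i + 1 then (st.1, j + 1)
              else (st.1 + 1, j)
            else (st.1 + 1, j))
          (c, j))
          = T.foldl _ (c, solAltSkip R i j + 1) from by
        rw [List.foldl_cons]; congr 1; simp [hlen, hval]]
      rw [IH (PySem.Set.discard ls i) (PySem.Set.discard rs (i - 1)) c (solAltSkip R i j + 1)
        hTlt (hlsN.filter _)
        (fun t ht => (PySem.Set.mem_discard _ _ _).mpr
          ⟨hLls t (List.mem_cons_of_mem _ ht), ne_of_gt (hiT t ht)⟩)
        (fun t ht => hLR t (List.mem_cons_of_mem _ ht))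
        (by omega)
        (by
          intro x hx
          obtain ⟨k, hk, hkk, he⟩ := (mem_drop_iff_idx R x _).mp hx
          refine (PySem.Set.mem_discard _ _ _).mpr ⟨inv1 x (hdropsub ?_), ?_⟩
          · exact (mem_drop_iff_idx R x _).mpr ⟨k, hk, by omega, he⟩
          · have : R[solAltSkip R i j] < R[k] := hpg _ _ hlen hk (by omega)
            omega)
        (fun x hx => inv2 x ((PySem.Set.mem_discard _ _ _).mp hx).1)
        (by
          intro x hx hnd t ht
          obtain ⟨hxrs, hxne⟩ := (PySem.Set.mem_discard _ _ _).mp hx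
          have hnd' : x ∉ R.drop (solAltSkip R i j) := by
            intro hmem
            obtain ⟨k, hk, hkk, he⟩ := (mem_drop_iff_idx R x _).mp hmem
            rcases Nat.eq_or_lt_of_le hkk with rfl | hklt
            · exact hxne (by omega)
            · exact hnd ((mem_drop_iff_idx R x _).mpr ⟨k, hk, by omega, he⟩)
          exact inv3' x hxrs hnd' t (List.mem_cons_of_mem _ ht))]
      rw [discard_len ls i hlsN hils]
      rw [Nat.cast_sub hls1]
      simp only [List.length_cons]
      push_cast
      omega
    · by_cases h2 : (i + 1) ∈ rs
      · -- matched with the right neighbour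
        obtain ⟨hlen, hval⟩ := at_ptr (i + 1) h2 (by omega) (Or.inr ⟨h1, rfl⟩)
        rw [show ((i :: T).foldl
            (fun (st : PySem.Set Int × PySem.Set Int) i =>
              if PySem.Set.contains st.2 (i - 1) then
                (PySem.Set.discard st.1 i, PySem.Set.discard st.2 (i - 1))
              else if PySem.Set.contains st.2 (i + 1) then
                (PySem.Set.discard st.1 i, PySem.Set.discard st.2 (i + 1))
              else st)
            (ls, rs))
            = T.foldl _ (PySem.Set.discard ls i, PySem.Set.discard rs (i + 1)) from by
          rw [List.foldl_cons]; congr 1; simp [h1, h2]]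
        rw [show ((i :: T).foldl
            (fun (st : Int × Nat) i =>
              let j := solAltSkip R i st.2
              if _h : j < R.length then
                if R[j] = i - 1 ∨ R[j] = i + 1 then (st.1, j + 1)
                else (st.1 + 1, j)
              else (st.1 + 1, j))
            (c, j))
            = T.foldl _ (c, solAltSkip R i j + 1) from by
          rw [List.foldl_cons]; congr 1; simp [hlen, hval]]
        rw [IH (PySem.Set.discard ls i) (PySem.Set.discard rs (i + 1)) c (solAltSkip R i j + 1)
          hTlt (hlsN.filter _)
          (fun t ht => (PySem.Set.mem_discard _ _ _).mpr
            ⟨hLls t (List.mem_cons_of_mem _ ht), ne_of_gt (hiT t ht)⟩)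
          (fun t ht => hLR t (List.mem_cons_of_mem _ ht))
          (by omega)
          (by
            intro x hx
            obtain ⟨k, hk, hkk, he⟩ := (mem_drop_iff_idx R x _).mp hx
            refine (PySem.Set.mem_discard _ _ _).mpr ⟨inv1 x (hdropsub ?_), ?_⟩
            · exact (mem_drop_iff_idx R x _).mpr ⟨k, hk, by omega, he⟩
            · have : R[solAltSkip R i j] < R[k] := hpg _ _ hlen hk (by omega)
              omega)
          (fun x hx => inv2 x ((PySem.Set.mem_discard _ _ _).mp hx).1)
          (by
            intro x hx hnd t ht
            obtain ⟨hxrs, hxne⟩ := (PySem.Set.mem_discard _ _ _).mp hx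
            have hnd' : x ∉ R.drop (solAltSkip R i j) := by
              intro hmem
              obtain ⟨k, hk, hkk, he⟩ := (mem_drop_iff_idx R x _).mp hmem
              rcases Nat.eq_or_lt_of_le hkk with rfl | hklt
              · exact hxne (by omega)
              · exact hnd ((mem_drop_iff_idx R x _).mpr ⟨k, hk, by omega, he⟩)
            exact inv3' x hxrs hnd' t (List.mem_cons_of_mem _ ht))]
        rw [discard_len ls i hlsN hils]
        rw [Nat.cast_sub hls1]
        simp only [List.length_cons]
        push_cast
        omega
      · -- unmatched: A keeps its state, B counts one more unmatched student
        have hnotB : ∀ h : solAltSkip R i j < R.length,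
            ¬(R[solAltSkip R i j] = i - 1 ∨ R[solAltSkip R i j] = i + 1) := by
          intro hlen hor
          have hRj'rs : R[solAltSkip R i j] ∈ rs :=
            inv1 _ (hdropsub ((mem_drop_iff_idx R _ (solAltSkip R i j)).mpr
              ⟨solAltSkip R i j, hlen, le_refl _, rfl⟩))
          rcases hor with hh | hh
          · exact h1 (hh ▸ hRj'rs)
          · exact h2 (hh ▸ hRj'rs)
        rw [show ((i :: T).foldl
            (fun (st : PySem.Set Int × PySem.Set Int) i =>
              if PySem.Set.contains st.2 (i - 1) then
                (PySem.Set.discard st.1 i, PySem.Set.discard st.2 (i - 1))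
              else if PySem.Set.contains st.2 (i + 1) then
                (PySem.Set.discard st.1 i, PySem.Set.discard st.2 (i + 1))
              else st)
            (ls, rs))
            = T.foldl _ (ls, rs) from by
          rw [List.foldl_cons]; congr 1; simp [h1, h2]]
        rw [show ((i :: T).foldl
            (fun (st : Int × Nat) i =>
              let j := solAltSkip R i st.2
              if _h : j < R.length then
                if R[j] = i - 1 ∨ R[j] = i + 1 then (st.1, j + 1)
                else (st.1 + 1, j)
              else (st.1 + 1, j))
            (c, j))
            = T.foldl _ (c + 1, solAltSkip R i j) from by
          rw [List.foldl_cons]; congr 1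
          by_cases hlen : solAltSkip R i j < R.length
          · simp [hlen, hnotB hlen]
          · simp [hlen]]
        rw [IH ls rs (c + 1) (solAltSkip R i j)
          hTlt hlsN
          (fun t ht => hLls t (List.mem_cons_of_mem _ ht))
          (fun t ht => hLR t (List.mem_cons_of_mem _ ht))
          hj'
          (fun x hx => inv1 x (hdropsub hx))
          inv2
          (fun x hx hnd t ht => inv3' x hx hnd t (List.mem_cons_of_mem _ ht))]
        simp only [List.length_cons]
        push_cast
        omega


theorem diff_inter_left (s t : PySem.Set Int) :
    PySem.Set.diff s (PySem.Set.inter s t) = PySem.Set.diff s t := by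
  show List.filter _ s = List.filter _ s
  apply List.filter_congr
  intro x hx
  congr 1
  by_cases hxt : x ∈ t
  · rw [(PySem.Set.contains_iff t x).mpr hxt,
      (PySem.Set.contains_iff _ x).mpr ((PySem.Set.mem_inter s t x).mpr ⟨hx, hxt⟩)]
  · have h1 : PySem.Set.contains t x = false := by
      rw [Bool.eq_false_iff]; exact fun hh => hxt ((PySem.Set.contains_iff t x).mp hh)
    have h2 : PySem.Set.contains (PySem.Set.inter s t) x = false := by
      rw [Bool.eq_false_iff]
      exact fun hh => hxt ((PySem.Set.mem_inter s t x).mp ((PySem.Set.contains_iff _ x).mp hh)).2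
    rw [h1, h2]

theorem diff_inter_right (s t : PySem.Set Int) :
    PySem.Set.diff t (PySem.Set.inter s t) = PySem.Set.diff t s := by
  show List.filter _ t = List.filter _ t
  apply List.filter_congr
  intro x hx
  congr 1
  by_cases hxs : x ∈ s
  · rw [(PySem.Set.contains_iff s x).mpr hxs,
      (PySem.Set.contains_iff _ x).mpr ((PySem.Set.mem_inter s t x).mpr ⟨hxs, hx⟩)]
  · have h1 : PySem.Set.contains s x = false := by
      rw [Bool.eq_false_iff]; exact fun hh => hxs ((PySem.Set.contains_iff s x).mp hh)
    have h2 : PySem.Set.contains (PySem.Set.inter s t) x = false := by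
      rw [Bool.eq_false_iff]
      exact fun hh => hxs ((PySem.Set.mem_inter s t x).mp ((PySem.Set.contains_iff _ x).mp hh)).1
    rw [h1, h2]

-- both folds started from the freshly built difference sets agree
theorem glue_folds (s t : PySem.Set Int) (hsN : s.Nodup) (htN : t.Nodup) :
    (((PySem.List.sorted (PySem.Set.diff s t) (fun x => x) false).foldl
      (fun (st : PySem.Set Int × PySem.Set Int) i =>
        if PySem.Set.contains st.2 (i - 1) then
          (PySem.Set.discard st.1 i, PySem.Set.discard st.2 (i - 1))
        else if PySem.Set.contains st.2 (i + 1) then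
          (PySem.Set.discard st.1 i, PySem.Set.discard st.2 (i + 1))
        else st)
      (PySem.Set.diff s t, PySem.Set.diff t s)).1.length : Int)
    = ((PySem.List.sorted (PySem.Set.diff s t) (fun x => x) false).foldl
        (fun (st : Int × Nat) i =>
          if _h : solAltSkip (PySem.List.sorted (PySem.Set.diff t s) (fun x => x) false) i st.2
              < (PySem.List.sorted (PySem.Set.diff t s) (fun x => x) false).length then
            if (PySem.List.sorted (PySem.Set.diff t s) (fun x => x) false)[
                  solAltSkip (PySem.List.sorted (PySem.Set.diff t s) (fun x => x) false) i st.2] = i - 1 ∨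
               (PySem.List.sorted (PySem.Set.diff t s) (fun x => x) false)[
                  solAltSkip (PySem.List.sorted (PySem.Set.diff t s) (fun x => x) false) i st.2] = i + 1 then
              (st.1, solAltSkip (PySem.List.sorted (PySem.Set.diff t s) (fun x => x) false) i st.2 + 1)
            else (st.1 + 1, solAltSkip (PySem.List.sorted (PySem.Set.diff t s) (fun x => x) false) i st.2)
          else (st.1 + 1, solAltSkip (PySem.List.sorted (PySem.Set.diff t s) (fun x => x) false) i st.2))
        ((0 : Int), (0 : Nat))).1 := by
  have hls0N : (PySem.Set.diff s t).Nodup := PySem.Set.nodup_diff s t hsN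
  have hrs0N : (PySem.Set.diff t s).Nodup := PySem.Set.nodup_diff t s htN
  have hLp := PySem.List.sorted_perm (PySem.Set.diff s t) (fun x => x) false
  have hRp := PySem.List.sorted_perm (PySem.Set.diff t s) (fun x => x) false
  have hLN : (PySem.List.sorted (PySem.Set.diff s t) (fun x => x) false).Nodup :=
    hLp.nodup_iff.mpr hls0N
  have hRN : (PySem.List.sorted (PySem.Set.diff t s) (fun x => x) false).Nodup :=
    hRp.nodup_iff.mpr hrs0N
  have hLle := PySem.List.sorted_pairwise (PySem.Set.diff s t) (fun x => x)
  have hRle := PySem.List.sorted_pairwise (PySem.Set.diff t s) (fun x => x)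
  have hLlt : (PySem.List.sorted (PySem.Set.diff s t) (fun x => x) false).Pairwise (· < ·) :=
    (hLle.and hLN).imp (fun hab => lt_of_le_of_ne hab.1 hab.2)
  have hRlt : (PySem.List.sorted (PySem.Set.diff t s) (fun x => x) false).Pairwise (· < ·) :=
    (hRle.and hRN).imp (fun hab => lt_of_le_of_ne hab.1 hab.2)
  have hmain := main_invariant
    (PySem.List.sorted (PySem.Set.diff t s) (fun x => x) false)
    (PySem.List.sorted (PySem.Set.diff s t) (fun x => x) false)
    (PySem.Set.diff s t) (PySem.Set.diff t s) 0 0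
    hRlt hLlt hls0N
    (fun i hi => hLp.mem_iff.mp hi)
    (fun i hi hiR => by
      have h1 := (PySem.Set.mem_diff s t i).mp (hLp.mem_iff.mp hi)
      have h2 := (PySem.Set.mem_diff t s i).mp (hRp.mem_iff.mp hiR)
      exact h1.2 h2.1)
    (Nat.zero_le _)
    (fun x hx => by rw [List.drop_zero] at hx; exact hRp.mem_iff.mp hx)
    (fun x hx => hRp.mem_iff.mpr hx)
    (fun x hx hnd => absurd (by rw [List.drop_zero]; exact hRp.mem_iff.mpr hx) hnd)
  have hlen : (PySem.List.sorted (PySem.Set.diff s t) (fun x => x) false).length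
      = (PySem.Set.diff s t).length := hLp.length_eq
  simp only [] at hmain
  omega

-- ===== VERDICT (by name: the statement is the Claim_ definition above) =====
theorem solution_spec : Claim_equal_solution := by
  unfold Claim_equal_solution Spec_solution
  intro n lost reserve _
  simp only [solution, solution_alt, diff_inter_left, diff_inter_right, PySem.Set.len]
  have hglue := glue_folds (PySem.Set.ofList lost) (PySem.Set.ofList reserve)
    (PySem.Set.nodup_ofList lost) (PySem.Set.nodup_ofList reserve)
  omega
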